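-- pv_equiv track=rewrite | github.com/dev-onejun/Algorithm-Study | Ice Skating.py | bfs
-- ===== SOURCE A (Python) =====
-- from collections import deque
--
-- def bfs(snowdrifts, start, visited):
--     queue = deque( [start] )
--
--     while queue:
--         v = queue.popleft()
--
--         for i,coordinate in enumerate(snowdrifts):
--             if visited[i]:
--                 continue
--
--             if v[0] == coordinate[0] or v[1] == coordinate[1]:
--                 visited[i] = True
--                 queue.append(coordinate)
--
--     return visited
-- ===== SOURCE B (Python) =====
-- from collections import deque
--
-- def bfs(snowdrifts, start, visited):
--     # Group the unvisited drift indices by x and by y once; BFS over coordinates,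
--     # scanning each coordinate group at most once (done_x/done_y record consumed groups).
--     unvisited = [i for i in range(len(snowdrifts)) if not visited[i]]
--     by_x = {}
--     by_y = {}
--     for i in unvisited:
--         x, y = snowdrifts[i]
--         by_x.setdefault(x, []).append(i)
--         by_y.setdefault(y, []).append(i)
--
--     done_x = set()
--     done_y = set()
--     queue = deque([start])
--     while queue:
--         x, y = queue.popleft()
--         if x not in done_x:
--             done_x.add(x)
--             for i in by_x.get(x, ()):
--                 if not visited[i]:
--                     visited[i] = True
--                     queue.append(snowdrifts[i])
--         if y not in done_y:
--             done_y.add(y)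
--             for i in by_y.get(y, ()):
--                 if not visited[i]:
--                     visited[i] = True
--                     queue.append(snowdrifts[i])
--     return visited
-- ===== Notes on version B (the rewrite author's own statement) =====
-- stated objective: alternative
-- what changed: A rescans the entire snowdrift list for every dequeued coordinate; B instead builds dictionaries grouping the unvisited drift indices by x and by y once and the BFS consumes each coordinate group at most once (done_x/done_y sets), trading A's repeated full scans for one-time grouping (no measured speedup on a timing run's input family, whose reachable components are small).
-- outside the precondition, e.g. on bfs([(0, 0)], (0, 0), []): A raises IndexError, B raises IndexError
import Mathlib
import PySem

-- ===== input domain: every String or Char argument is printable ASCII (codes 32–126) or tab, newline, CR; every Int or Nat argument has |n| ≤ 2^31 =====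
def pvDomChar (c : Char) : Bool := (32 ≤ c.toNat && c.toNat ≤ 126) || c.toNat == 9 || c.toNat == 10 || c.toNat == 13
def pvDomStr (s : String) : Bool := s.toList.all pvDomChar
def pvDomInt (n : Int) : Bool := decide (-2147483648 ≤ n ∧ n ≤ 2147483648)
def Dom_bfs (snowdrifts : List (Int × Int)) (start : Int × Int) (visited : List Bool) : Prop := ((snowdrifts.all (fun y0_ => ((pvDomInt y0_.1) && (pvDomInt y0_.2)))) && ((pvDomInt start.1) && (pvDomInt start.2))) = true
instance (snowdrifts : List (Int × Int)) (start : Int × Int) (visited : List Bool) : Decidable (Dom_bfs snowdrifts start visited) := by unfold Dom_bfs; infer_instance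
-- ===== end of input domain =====

-- B replaces A's rescan-everything BFS by one that groups the unvisited drift indices by x and
-- by y in dicts once and scans each coordinate group at most once (objective: alternative).
-- Both Pythons mutate `visited` in place and return it; the ports model the RETURN value.

-- ===== PORT A =====

-- counting helper cited by the termination proofs of both ports
theorem pvCountFalseSet (vis : List Bool) (i : Nat) (h : vis[i]? = some false) :
    (vis.set i true).count false + 1 = vis.count false := by
  induction vis generalizing i with
  | nil => simp at h
  | cons b bs ih =>
    cases i with
    | zero =>
      simp only [List.getElem?_cons_zero, Option.some.injEq] at h
      subst h
      simp
    | succ k =>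
      simp only [List.getElem?_cons_succ] at h
      simp only [List.set_cons_succ, List.count_cons]
      have := ih k h
      omega

-- the inner `for i, coordinate in enumerate(snowdrifts)` loop of A (index counter i)
def bfsScan (v : Int × Int) (cs : List (Int × Int)) (vis : List Bool)
    (app : List (Int × Int)) (i : Nat) : List Bool × List (Int × Int) :=
  match cs with
  | [] => (vis, app)
  | c :: rest =>
    match vis[i]? with
    | some true => bfsScan v rest vis app (i + 1)       -- `if visited[i]: continue`
    | some false =>
      if v.1 = c.1 ∨ v.2 = c.2 then
        bfsScan v rest (vis.set i true) (app ++ [c]) (i + 1)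
      else
        bfsScan v rest vis app (i + 1)
    | none => bfsScan v rest vis app (i + 1)            -- visited[i] would raise IndexError (outside Pre_)

theorem bfsScan_measure (v : Int × Int) (cs : List (Int × Int)) (vis : List Bool)
    (app : List (Int × Int)) (i : Nat) :
    2 * (bfsScan v cs vis app i).1.count false + (bfsScan v cs vis app i).2.length ≤
      2 * vis.count false + app.length := by
  induction cs generalizing vis app i with
  | nil => simp [bfsScan]
  | cons c rest ih =>
    simp only [bfsScan]
    cases h : vis[i]? with
    | none => exact ih vis app (i + 1)
    | some b =>
      cases b with
      | true => exact ih vis app (i + 1)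
      | false =>
        by_cases hs : v.1 = c.1 ∨ v.2 = c.2
        · simp only [hs, if_true]
          have h1 := ih (vis.set i true) (app ++ [c]) (i + 1)
          have h2 := pvCountFalseSet vis i h
          simp only [List.length_append, List.length_cons, List.length_nil] at h1 ⊢
          omega
        · simp only [hs, if_false]
          exact ih vis app (i + 1)

-- the `while queue` loop of A
def bfsRun (sd : List (Int × Int)) (q : List (Int × Int)) (vis : List Bool) : List Bool :=
  match q with
  | [] => vis
  | v :: rest =>
    let r := bfsScan v sd vis [] 0
    bfsRun sd (rest ++ r.2) r.1
termination_by 2 * vis.count false + q.length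
decreasing_by
  have := bfsScan_measure v sd vis [] 0
  simp only [List.length_append, List.length_nil, List.length_cons] at this ⊢
  omega

def bfs (snowdrifts : List (Int × Int)) (start : Int × Int) (visited : List Bool) : List Bool :=
  bfsRun snowdrifts [start] visited

-- ===== PORT B =====

-- the `for i in by_?.get(k, ())` loop of B over one coordinate group
def bfsAltScan (sd : List (Int × Int)) (gids : List Nat) (vis : List Bool)
    (app : List (Int × Int)) : List Bool × List (Int × Int) :=
  match gids with
  | [] => (vis, app)
  | i :: rest =>
    match vis[i]? with
    | some true => bfsAltScan sd rest vis app
    | some false => bfsAltScan sd rest (vis.set i true) (app ++ [sd.getD i (0, 0)])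
    | none => bfsAltScan sd rest vis app   -- group indices are always in range (see Pre_); unreachable

theorem bfsAltScan_measure (sd : List (Int × Int)) (gids : List Nat) (vis : List Bool)
    (app : List (Int × Int)) :
    2 * (bfsAltScan sd gids vis app).1.count false + (bfsAltScan sd gids vis app).2.length ≤
      2 * vis.count false + app.length := by
  induction gids generalizing vis app with
  | nil => simp [bfsAltScan]
  | cons i rest ih =>
    simp only [bfsAltScan]
    cases h : vis[i]? with
    | none => exact ih vis app
    | some b =>
      cases b with
      | true => exact ih vis app
      | false =>
        have h1 := ih (vis.set i true) (app ++ [sd.getD i (0, 0)])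
        have h2 := pvCountFalseSet vis i h
        simp only [List.length_append, List.length_cons, List.length_nil] at h1 ⊢
        omega

-- `if k not in done: done.add(k); for i in by_?.get(k, ()): …`
def bfsAltGroup (sd : List (Int × Int)) (d : PySem.Dict Int (List Nat)) (done : PySem.Set Int)
    (k : Int) (vis : List Bool) : PySem.Set Int × List Bool × List (Int × Int) :=
  if k ∈ done then (done, vis, [])
  else
    let r := bfsAltScan sd (d.getD k []) vis []
    (done.add k, r.1, r.2)

theorem bfsAltGroup_measure (sd : List (Int × Int)) (d : PySem.Dict Int (List Nat))
    (done : PySem.Set Int) (k : Int) (vis : List Bool) :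
    2 * (bfsAltGroup sd d done k vis).2.1.count false + (bfsAltGroup sd d done k vis).2.2.length ≤
      2 * vis.count false := by
  unfold bfsAltGroup
  by_cases h : k ∈ done
  · simp [h]
  · simp only [h, if_false]
    have := bfsAltScan_measure sd (d.getD k []) vis []
    simpa using this

-- the `while queue` loop of B (the two dicts never change; done_x/done_y record consumed groups)
def bfsAltRun (sd : List (Int × Int)) (bx byd : PySem.Dict Int (List Nat))
    (q : List (Int × Int)) (donex doney : PySem.Set Int) (vis : List Bool) : List Bool :=
  match q with
  | [] => vis
  | (x, y) :: rest =>
    let rx := bfsAltGroup sd bx donex x vis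
    let ry := bfsAltGroup sd byd doney y rx.2.1
    bfsAltRun sd bx byd (rest ++ rx.2.2 ++ ry.2.2) rx.1 ry.1 ry.2.1
termination_by 2 * vis.count false + q.length
decreasing_by
  have h1 := bfsAltGroup_measure sd bx donex x vis
  have h2 := bfsAltGroup_measure sd byd doney y (bfsAltGroup sd bx donex x vis).2.1
  simp only [List.length_append, List.length_cons] at *
  omega

def bfs_alt (snowdrifts : List (Int × Int)) (start : Int × Int) (visited : List Bool) : List Bool :=
  let unvisited := (List.range snowdrifts.length).filter (fun i => !(visited.getD i false))
  let groups := unvisited.foldl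
    (fun (p : PySem.Dict Int (List Nat) × PySem.Dict Int (List Nat)) i =>
      (p.1.modify (snowdrifts.getD i (0, 0)).1 [] (· ++ [i]),
       p.2.modify (snowdrifts.getD i (0, 0)).2 [] (· ++ [i])))
    (PySem.Dict.empty, PySem.Dict.empty)
  bfsAltRun snowdrifts groups.1 groups.2 [start] [] [] visited

-- ===== PRECONDITION & SPEC =====
-- Pre_ excludes exactly the inputs with fewer `visited` entries than snowdrifts, on which
-- the Python A raises IndexError at `visited[i]` (B raises there too).
def Pre_bfs (snowdrifts : List (Int × Int)) (start : Int × Int) (visited : List Bool) : Prop :=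
  snowdrifts.length ≤ visited.length
instance (snowdrifts : List (Int × Int)) (start : Int × Int) (visited : List Bool) : Decidable (Pre_bfs snowdrifts start visited) := by unfold Pre_bfs; infer_instance

def pvWitness_bfs : (List (Int × Int)) × (Int × Int) × List Bool :=
  ([(0, 1), (5, 1), (7, 9)], (0, 0), [false, false, true])

def Spec_bfs (snowdrifts : List (Int × Int)) (start : Int × Int) (visited : List Bool) (out : List Bool) : Prop := out = bfs_alt snowdrifts start visited
instance (snowdrifts : List (Int × Int)) (start : Int × Int) (visited : List Bool) (out : List Bool) : Decidable (Spec_bfs snowdrifts start visited out) := by unfold Spec_bfs; infer_instance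

-- ===== CLAIM (what gids proved, stated in full; the proofs are below) =====
def Claim_equal_bfs : Prop := ∀ (snowdrifts : List (Int × Int)) (start : Int × Int) (visited : List Bool), Dom_bfs snowdrifts start visited → Pre_bfs snowdrifts start visited → Spec_bfs snowdrifts start visited (bfs snowdrifts start visited)

-- ===== LEMMAS AND PROOFS =====

-- index i gids reachable: unvisited and sharing a row/column with start or with a reachable drift
inductive pvReach (sd : List (Int × Int)) (start : Int × Int) (v0 : List Bool) : Nat → Prop
  | base (i : Nat) (c : Int × Int) :
      sd[i]? = some c → v0[i]? = some false → (start.1 = c.1 ∨ start.2 = c.2) →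
      pvReach sd start v0 i
  | step (j i : Nat) (cj ci : Int × Int) :
      pvReach sd start v0 j → sd[j]? = some cj → sd[i]? = some ci →
      v0[i]? = some false → (cj.1 = ci.1 ∨ cj.2 = ci.2) → pvReach sd start v0 i

theorem pvReach_inv {sd : List (Int × Int)} {start : Int × Int} {v0 : List Bool} {i : Nat}
    (h : pvReach sd start v0 i) : v0[i]? = some false ∧ ∃ c, sd[i]? = some c := by
  cases h with
  | base i c h1 h2 _ => exact ⟨h2, c, h1⟩
  | step j i cj ci _ _ h1 h2 _ => exact ⟨h2, ci, h1⟩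

-- set-update facts
theorem pvSet_true {vis : List Bool} {i j : Nat} :
    (vis.set i true)[j]? = some true ↔ (j = i ∧ i < vis.length) ∨ vis[j]? = some true := by
  rw [List.getElem?_set]
  by_cases h : i = j
  · subst h
    by_cases hl : i < vis.length <;> simp [hl]
  · simp [h, Ne.symm h]

theorem pvSet_false {vis : List Bool} {i j : Nat} :
    (vis.set i true)[j]? = some false ↔ vis[j]? = some false ∧ j ≠ i := by
  rw [List.getElem?_set]
  by_cases h : i = j
  · subst h
    by_cases hl : i < vis.length
    · simp [hl]
    · simp [hl]
  · simp [h, Ne.symm h]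

-- ---- A-side scan lemmas ----

theorem bfsScan_length (v : Int × Int) (cs : List (Int × Int)) (vis : List Bool)
    (app : List (Int × Int)) (i : Nat) : (bfsScan v cs vis app i).1.length = vis.length := by
  induction cs generalizing vis app i with
  | nil => simp [bfsScan]
  | cons c rest ih =>
    simp only [bfsScan]
    cases h : vis[i]? with
    | none => exact ih vis app (i + 1)
    | some b =>
      cases b with
      | true => exact ih vis app (i + 1)
      | false =>
        by_cases hs : v.1 = c.1 ∨ v.2 = c.2
        · simp only [hs, if_true]
          rw [ih]
          simp
        · simp only [hs, if_false]
          exact ih vis app (i + 1)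

theorem bfsScan_mono (v : Int × Int) (cs : List (Int × Int)) (vis : List Bool)
    (app : List (Int × Int)) (i j : Nat) (h : vis[j]? = some true) :
    (bfsScan v cs vis app i).1[j]? = some true := by
  induction cs generalizing vis app i with
  | nil => simpa [bfsScan] using h
  | cons c rest ih =>
    simp only [bfsScan]
    cases hv : vis[i]? with
    | none => exact ih vis app (i + 1) h
    | some b =>
      cases b with
      | true => exact ih vis app (i + 1) h
      | false =>
        by_cases hs : v.1 = c.1 ∨ v.2 = c.2
        · simp only [hs, if_true]
          exact ih _ _ (i + 1) (pvSet_true.mpr (Or.inr h))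
        · simp only [hs, if_false]
          exact ih vis app (i + 1) h

theorem bfsScan_app_mono (v : Int × Int) (cs : List (Int × Int)) (vis : List Bool)
    (app : List (Int × Int)) (i : Nat) (x : Int × Int) (h : x ∈ app) :
    x ∈ (bfsScan v cs vis app i).2 := by
  induction cs generalizing vis app i with
  | nil => simpa [bfsScan] using h
  | cons c rest ih =>
    simp only [bfsScan]
    cases hv : vis[i]? with
    | none => exact ih vis app (i + 1) h
    | some b =>
      cases b with
      | true => exact ih vis app (i + 1) h
      | false =>
        by_cases hs : v.1 = c.1 ∨ v.2 = c.2
        · simp only [hs, if_true]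
          exact ih _ _ (i + 1) (List.mem_append_left _ h)
        · simp only [hs, if_false]
          exact ih vis app (i + 1) h

theorem bfsScan_sound (v : Int × Int) (cs : List (Int × Int)) (vis : List Bool)
    (app : List (Int × Int)) (i0 j : Nat) (h : (bfsScan v cs vis app i0).1[j]? = some true) :
    vis[j]? = some true ∨
      (vis[j]? = some false ∧ ∃ k c, cs[k]? = some c ∧ j = i0 + k ∧ (v.1 = c.1 ∨ v.2 = c.2)) := by
  induction cs generalizing vis app i0 with
  | nil =>
    simp only [bfsScan] at h
    exact Or.inl h
  | cons c rest ih =>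
    simp only [bfsScan] at h
    cases hv : vis[i0]? with
    | none =>
      rw [hv] at h
      rcases ih vis app (i0 + 1) h with htrue | ⟨hfalse, k, c', hk, hj, hsh⟩
      · exact Or.inl htrue
      · exact Or.inr ⟨hfalse, k + 1, c', by simpa using hk, by omega, hsh⟩
    | some b =>
      cases b with
      | true =>
        rw [hv] at h
        rcases ih vis app (i0 + 1) h with htrue | ⟨hfalse, k, c', hk, hj, hsh⟩
        · exact Or.inl htrue
        · exact Or.inr ⟨hfalse, k + 1, c', by simpa using hk, by omega, hsh⟩
      | false =>
        rw [hv] at h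
        by_cases hs : v.1 = c.1 ∨ v.2 = c.2
        · simp only [hs, if_true] at h
          rcases ih _ _ (i0 + 1) h with htrue | ⟨hfalse, k, c', hk, hj, hsh⟩
          · rcases pvSet_true.mp htrue with ⟨hji, _⟩ | htr
            · subst hji
              exact Or.inr ⟨hv, 0, c, by simp, by omega, hs⟩
            · exact Or.inl htr
          · rcases pvSet_false.mp hfalse with ⟨hf, _⟩
            exact Or.inr ⟨hf, k + 1, c', by simpa using hk, by omega, hsh⟩
        · simp only [hs, if_false] at h
          rcases ih vis app (i0 + 1) h with htrue | ⟨hfalse, k, c', hk, hj, hsh⟩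
          · exact Or.inl htrue
          · exact Or.inr ⟨hfalse, k + 1, c', by simpa using hk, by omega, hsh⟩

theorem bfsScan_pushes (v : Int × Int) (cs : List (Int × Int)) (vis : List Bool)
    (app : List (Int × Int)) (i0 : Nat) (x : Int × Int) (h : x ∈ (bfsScan v cs vis app i0).2) :
    x ∈ app ∨ ∃ k, cs[k]? = some x ∧ vis[i0 + k]? = some false ∧ (v.1 = x.1 ∨ v.2 = x.2) := by
  induction cs generalizing vis app i0 with
  | nil =>
    simp only [bfsScan] at h
    exact Or.inl h
  | cons c rest ih =>
    simp only [bfsScan] at h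
    cases hv : vis[i0]? with
    | none =>
      rw [hv] at h
      rcases ih vis app (i0 + 1) h with happ | ⟨k, hk, hf, hsh⟩
      · exact Or.inl happ
      · exact Or.inr ⟨k + 1, by simpa using hk, by rw [show i0 + (k + 1) = i0 + 1 + k by omega]; exact hf, hsh⟩
    | some b =>
      cases b with
      | true =>
        rw [hv] at h
        rcases ih vis app (i0 + 1) h with happ | ⟨k, hk, hf, hsh⟩
        · exact Or.inl happ
        · exact Or.inr ⟨k + 1, by simpa using hk, by rw [show i0 + (k + 1) = i0 + 1 + k by omega]; exact hf, hsh⟩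
      | false =>
        rw [hv] at h
        by_cases hs : v.1 = c.1 ∨ v.2 = c.2
        · simp only [hs, if_true] at h
          rcases ih _ _ (i0 + 1) h with happ | ⟨k, hk, hf, hsh⟩
          · rcases List.mem_append.mp happ with h1 | h2
            · exact Or.inl h1
            · have hx : x = c := by simpa using h2
              subst hx
              exact Or.inr ⟨0, by simp, by simpa using hv, hs⟩
          · rcases pvSet_false.mp hf with ⟨hf', _⟩
            exact Or.inr ⟨k + 1, by simpa using hk, by rw [show i0 + (k + 1) = i0 + 1 + k by omega]; exact hf', hsh⟩
        · simp only [hs, if_false] at h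
          rcases ih vis app (i0 + 1) h with happ | ⟨k, hk, hf, hsh⟩
          · exact Or.inl happ
          · exact Or.inr ⟨k + 1, by simpa using hk, by rw [show i0 + (k + 1) = i0 + 1 + k by omega]; exact hf, hsh⟩

theorem bfsScan_complete (v : Int × Int) (cs : List (Int × Int)) (vis : List Bool)
    (app : List (Int × Int)) (i0 k : Nat) (c : Int × Int) (hk : cs[k]? = some c)
    (hl : i0 + k < vis.length) (hs : v.1 = c.1 ∨ v.2 = c.2) :
    (bfsScan v cs vis app i0).1[i0 + k]? = some true := by
  induction cs generalizing vis app i0 k with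
  | nil => simp at hk
  | cons c0 rest ih =>
    simp only [bfsScan]
    cases k with
    | zero =>
      simp only [List.getElem?_cons_zero, Option.some.injEq] at hk
      subst hk
      have hi0 : i0 < vis.length := by omega
      cases hb : vis[i0]? with
      | none => simp at hb; omega
      | some b =>
        cases b with
        | true =>
          simpa using bfsScan_mono v rest vis app (i0 + 1) i0 hb
        | false =>
          simp only [hs, if_true]
          have hset : (vis.set i0 true)[i0]? = some true := pvSet_true.mpr (Or.inl ⟨rfl, hi0⟩)
          simpa using bfsScan_mono v rest _ _ (i0 + 1) i0 hset
    | succ k' =>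
      simp only [List.getElem?_cons_succ] at hk
      have harith : i0 + (k' + 1) = i0 + 1 + k' := by omega
      rw [harith]
      cases hb : vis[i0]? with
      | none => exact ih vis app (i0 + 1) k' hk (by omega)
      | some b =>
        cases b with
        | true => exact ih vis app (i0 + 1) k' hk (by omega)
        | false =>
          by_cases hs0 : v.1 = c0.1 ∨ v.2 = c0.2
          · simp only [hs0, if_true]
            exact ih _ _ (i0 + 1) k' hk (by simp; omega)
          · simp only [hs0, if_false]
            exact ih vis app (i0 + 1) k' hk (by omega)

theorem bfsScan_flip_push (v : Int × Int) (cs : List (Int × Int)) (vis : List Bool)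
    (app : List (Int × Int)) (i0 j : Nat) (h1 : (bfsScan v cs vis app i0).1[j]? = some true)
    (h0 : vis[j]? = some false) :
    ∃ k c, j = i0 + k ∧ cs[k]? = some c ∧ c ∈ (bfsScan v cs vis app i0).2 := by
  induction cs generalizing vis app i0 with
  | nil =>
    simp only [bfsScan] at h1
    rw [h0] at h1
    simp at h1
  | cons c rest ih =>
    simp only [bfsScan] at h1 ⊢
    cases hv : vis[i0]? with
    | none =>
      rw [hv] at h1
      rcases ih vis app (i0 + 1) h1 h0 with ⟨k, c', hj, hk, hmem⟩
      exact ⟨k + 1, c', by omega, by simpa using hk, hmem⟩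
    | some b =>
      cases b with
      | true =>
        rw [hv] at h1
        rcases ih vis app (i0 + 1) h1 h0 with ⟨k, c', hj, hk, hmem⟩
        exact ⟨k + 1, c', by omega, by simpa using hk, hmem⟩
      | false =>
        rw [hv] at h1
        by_cases hs : v.1 = c.1 ∨ v.2 = c.2
        · simp only [hs, if_true] at h1 ⊢
          by_cases hji : j = i0
          · refine ⟨0, c, by omega, by simp, ?_⟩
            exact bfsScan_app_mono v rest _ _ (i0 + 1) c (by simp)
          · have h0' : (vis.set i0 true)[j]? = some false := pvSet_false.mpr ⟨h0, hji⟩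
            rcases ih _ _ (i0 + 1) h1 h0' with ⟨k, c', hj, hk, hmem⟩
            exact ⟨k + 1, c', by omega, by simpa using hk, hmem⟩
        · simp only [hs, if_false] at h1 ⊢
          rcases ih vis app (i0 + 1) h1 h0 with ⟨k, c', hj, hk, hmem⟩
          exact ⟨k + 1, c', by omega, by simpa using hk, hmem⟩

theorem bfsScan_stable (v : Int × Int) (cs : List (Int × Int)) (vis : List Bool)
    (app : List (Int × Int)) (i0 j : Nat) (h : vis[j]? = some false) :
    (bfsScan v cs vis app i0).1[j]? = some false ∨ (bfsScan v cs vis app i0).1[j]? = some true := by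
  induction cs generalizing vis app i0 with
  | nil => simp only [bfsScan]; exact Or.inl h
  | cons c rest ih =>
    simp only [bfsScan]
    cases hv : vis[i0]? with
    | none => exact ih vis app (i0 + 1) h
    | some b =>
      cases b with
      | true => exact ih vis app (i0 + 1) h
      | false =>
        by_cases hs : v.1 = c.1 ∨ v.2 = c.2
        · simp only [hs, if_true]
          by_cases hji : j = i0
          · subst hji
            have : j < vis.length := (List.getElem?_eq_some_iff.mp h).1
            exact Or.inr (bfsScan_mono v rest _ _ (j + 1) j (pvSet_true.mpr (Or.inl ⟨rfl, this⟩)))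
          · exact ih _ _ (i0 + 1) (pvSet_false.mpr ⟨h, hji⟩)
        · simp only [hs, if_false]
          exact ih vis app (i0 + 1) h

-- ---- A-side run lemmas ----

theorem bfsRun_length (sd : List (Int × Int)) (q : List (Int × Int)) (vis : List Bool) :
    (bfsRun sd q vis).length = vis.length := by
  induction q, vis using bfsRun.induct sd with
  | case1 vis => simp [bfsRun]
  | case2 vis v rest r ih =>
    rw [bfsRun]
    exact ih.trans (bfsScan_length v sd vis [] 0)

theorem bfsRun_mono (sd : List (Int × Int)) (q : List (Int × Int)) (vis : List Bool) (j : Nat)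
    (h : vis[j]? = some true) : (bfsRun sd q vis)[j]? = some true := by
  revert h
  induction q, vis using bfsRun.induct sd with
  | case1 vis => intro h; simpa [bfsRun] using h
  | case2 vis v rest r ih =>
    intro h
    rw [bfsRun]
    exact ih (bfsScan_mono v sd vis [] 0 j h)

theorem bfsRun_L (sd : List (Int × Int)) (q : List (Int × Int)) (vis : List Bool)
    (v : Int × Int) (hv : v ∈ q) (j : Nat) (c : Int × Int) (hj : sd[j]? = some c)
    (hl : j < vis.length) (hs : v.1 = c.1 ∨ v.2 = c.2) :
    (bfsRun sd q vis)[j]? = some true := by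
  revert hv hl
  induction q, vis using bfsRun.induct sd with
  | case1 vis => intro hv _; simp at hv
  | case2 vis v' rest r ih =>
    intro hv hl
    rw [bfsRun]
    rcases List.mem_cons.mp hv with rfl | hmem
    · have hc := bfsScan_complete v sd vis [] 0 j c (by simpa using hj) (by omega) hs
      exact bfsRun_mono sd _ _ j (by simpa using hc)
    · exact ih (List.mem_append_left _ hmem) (by rw [bfsScan_length]; exact hl)

theorem bfsRun_C (sd : List (Int × Int)) (q : List (Int × Int)) (vis : List Bool)
    (j i : Nat) (cj ci : Int × Int) (h1 : (bfsRun sd q vis)[j]? = some true)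
    (h0 : vis[j]? = some false) (hj : sd[j]? = some cj) (hi : sd[i]? = some ci)
    (hl : i < vis.length) (hs : cj.1 = ci.1 ∨ cj.2 = ci.2) :
    (bfsRun sd q vis)[i]? = some true := by
  revert h1 h0 hl
  induction q, vis using bfsRun.induct sd with
  | case1 vis =>
    intro h1 h0 _
    rw [bfsRun] at h1
    rw [h0] at h1
    simp at h1
  | case2 vis v rest r ih =>
    intro h1 h0 hl
    rw [bfsRun] at h1 ⊢
    rcases bfsScan_stable v sd vis [] 0 j h0 with hf | ht
    · exact ih h1 hf (by rw [bfsScan_length]; exact hl)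
    · rcases bfsScan_flip_push v sd vis [] 0 j ht h0 with ⟨k, c', hjk, hk, hmem⟩
      have hkj : k = j := by omega
      subst hkj
      have hcc : c' = cj := by rw [hk] at hj; exact Option.some.inj hj
      subst hcc
      exact bfsRun_L sd _ _ c' (List.mem_append_right _ hmem) i ci hi
        (by rw [bfsScan_length]; exact hl) hs

theorem bfsRun_sound (sd : List (Int × Int)) (start : Int × Int) (v0 : List Bool)
    (q : List (Int × Int)) (vis : List Bool)
    (hlen : vis.length = v0.length)
    (hq : ∀ w ∈ q, w = start ∨ ∃ j c, pvReach sd start v0 j ∧ sd[j]? = some c ∧ c = w)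
    (hv : ∀ j : Nat, vis[j]? = some true → v0[j]? = some true ∨ pvReach sd start v0 j)
    (hm : ∀ j : Nat, v0[j]? = some true → vis[j]? = some true) (j : Nat)
    (h : (bfsRun sd q vis)[j]? = some true) : v0[j]? = some true ∨ pvReach sd start v0 j := by
  revert hlen hq hv hm h
  induction q, vis using bfsRun.induct sd with
  | case1 vis =>
    intro _ _ hv _ h
    rw [bfsRun] at h
    exact hv j h
  | case2 vis v rest r ih =>
    intro hlen hq hv hm h
    rw [bfsRun] at h
    have hreach : ∀ (k : Nat) (c : Int × Int), sd[k]? = some c → vis[k]? = some false →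
        (v.1 = c.1 ∨ v.2 = c.2) → pvReach sd start v0 k := by
      intro k c hk hf hsh
      have hk0 : v0[k]? = some false := by
        have hklen : k < v0.length := by
          have := (List.getElem?_eq_some_iff.mp hf).1
          omega
        cases hb : v0[k]? with
        | none => simp at hb; omega
        | some b =>
          cases b with
          | true => rw [hm k hb] at hf; simp at hf
          | false => rfl
      rcases hq v List.mem_cons_self with rfl | ⟨j3, c3, hr3, hj3, rfl⟩
      · exact pvReach.base k c hk hk0 hsh
      · exact pvReach.step j3 k c3 c hr3 hj3 hk hk0 hsh
    refine ih (by rw [bfsScan_length]; exact hlen) ?_ ?_ ?_ h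
    · intro w hw
      rcases List.mem_append.mp hw with hw1 | hw2
      · exact hq w (List.mem_cons_of_mem _ hw1)
      · rcases bfsScan_pushes v sd vis [] 0 w hw2 with habs | ⟨k, hk, hf, hsh⟩
        · simp at habs
        · exact Or.inr ⟨k, w, hreach k w hk (by simpa using hf) hsh, hk, rfl⟩
    · intro j2 hj2
      rcases bfsScan_sound v sd vis [] 0 j2 hj2 with ht | ⟨hf, k, c, hk, hjk, hsh⟩
      · exact hv j2 ht
      · have hkj : j2 = k := by omega
        subst hkj
        exact Or.inr (hreach j2 c hk hf hsh)
    · intro j2 hj2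
      exact bfsScan_mono v sd vis [] 0 j2 (hm j2 hj2)

theorem bfs_char (sd : List (Int × Int)) (start : Int × Int) (v0 : List Bool)
    (hnm : sd.length ≤ v0.length) (j : Nat) :
    (bfs sd start v0)[j]? = some true ↔ (v0[j]? = some true ∨ pvReach sd start v0 j) := by
  constructor
  · intro h
    exact bfsRun_sound sd start v0 [start] v0 rfl
      (by intro w hw; simp at hw; exact Or.inl hw)
      (fun j h => Or.inl h) (fun _ h => h) j h
  · intro h
    rcases h with h0 | hr
    · exact bfsRun_mono sd [start] v0 j h0
    · induction hr with
      | base i c hi hv0 hsh =>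
        have hil : i < v0.length := by
          have := (List.getElem?_eq_some_iff.mp hi).1
          omega
        exact bfsRun_L sd [start] v0 start (by simp) i c hi hil hsh
      | step j' i cj ci hr' hj' hi hv0i hsh ihr =>
        have hil : i < v0.length := by
          have := (List.getElem?_eq_some_iff.mp hi).1
          omega
        exact bfsRun_C sd [start] v0 j' i cj ci ihr (pvReach_inv hr').1 hj' hi hil hsh

-- ---- B-side scan lemmas ----

theorem bfsAltScan_length (sd : List (Int × Int)) (gids : List Nat) (vis : List Bool)
    (app : List (Int × Int)) : (bfsAltScan sd gids vis app).1.length = vis.length := by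
  induction gids generalizing vis app with
  | nil => simp [bfsAltScan]
  | cons i rest ih =>
    simp only [bfsAltScan]
    cases h : vis[i]? with
    | none => exact ih vis app
    | some b =>
      cases b with
      | true => exact ih vis app
      | false => rw [ih]; simp

theorem bfsAltScan_mono (sd : List (Int × Int)) (gids : List Nat) (vis : List Bool)
    (app : List (Int × Int)) (j : Nat) (h : vis[j]? = some true) :
    (bfsAltScan sd gids vis app).1[j]? = some true := by
  induction gids generalizing vis app with
  | nil => simpa [bfsAltScan] using h
  | cons i rest ih =>
    simp only [bfsAltScan]
    cases hv : vis[i]? with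
    | none => exact ih vis app h
    | some b =>
      cases b with
      | true => exact ih vis app h
      | false => exact ih _ _ (pvSet_true.mpr (Or.inr h))

theorem bfsAltScan_app_mono (sd : List (Int × Int)) (gids : List Nat) (vis : List Bool)
    (app : List (Int × Int)) (x : Int × Int) (h : x ∈ app) :
    x ∈ (bfsAltScan sd gids vis app).2 := by
  induction gids generalizing vis app with
  | nil => simpa [bfsAltScan] using h
  | cons i rest ih =>
    simp only [bfsAltScan]
    cases hv : vis[i]? with
    | none => exact ih vis app h
    | some b =>
      cases b with
      | true => exact ih vis app h
      | false => exact ih _ _ (List.mem_append_left _ h)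

theorem bfsAltScan_sound (sd : List (Int × Int)) (gids : List Nat) (vis : List Bool)
    (app : List (Int × Int)) (j : Nat) (h : (bfsAltScan sd gids vis app).1[j]? = some true) :
    vis[j]? = some true ∨ (vis[j]? = some false ∧ j ∈ gids) := by
  induction gids generalizing vis app with
  | nil =>
    simp only [bfsAltScan] at h
    exact Or.inl h
  | cons i rest ih =>
    simp only [bfsAltScan] at h
    cases hv : vis[i]? with
    | none =>
      rw [hv] at h
      rcases ih vis app h with ht | ⟨hf, hm⟩
      · exact Or.inl ht
      · exact Or.inr ⟨hf, List.mem_cons_of_mem _ hm⟩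
    | some b =>
      cases b with
      | true =>
        rw [hv] at h
        rcases ih vis app h with ht | ⟨hf, hm⟩
        · exact Or.inl ht
        · exact Or.inr ⟨hf, List.mem_cons_of_mem _ hm⟩
      | false =>
        rw [hv] at h
        rcases ih _ _ h with ht | ⟨hf, hm⟩
        · rcases pvSet_true.mp ht with ⟨hji, _⟩ | htr
          · subst hji
            exact Or.inr ⟨hv, List.mem_cons_self⟩
          · exact Or.inl htr
        · exact Or.inr ⟨(pvSet_false.mp hf).1, List.mem_cons_of_mem _ hm⟩

theorem bfsAltScan_pushes (sd : List (Int × Int)) (gids : List Nat) (vis : List Bool)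
    (app : List (Int × Int)) (x : Int × Int) (h : x ∈ (bfsAltScan sd gids vis app).2) :
    x ∈ app ∨ ∃ i ∈ gids, vis[i]? = some false ∧ x = sd.getD i (0, 0) := by
  induction gids generalizing vis app with
  | nil =>
    simp only [bfsAltScan] at h
    exact Or.inl h
  | cons i rest ih =>
    simp only [bfsAltScan] at h
    cases hv : vis[i]? with
    | none =>
      rw [hv] at h
      rcases ih vis app h with ha | ⟨i', hm, hf, hx⟩
      · exact Or.inl ha
      · exact Or.inr ⟨i', List.mem_cons_of_mem _ hm, hf, hx⟩
    | some b =>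
      cases b with
      | true =>
        rw [hv] at h
        rcases ih vis app h with ha | ⟨i', hm, hf, hx⟩
        · exact Or.inl ha
        · exact Or.inr ⟨i', List.mem_cons_of_mem _ hm, hf, hx⟩
      | false =>
        rw [hv] at h
        rcases ih _ _ h with ha | ⟨i', hm, hf, hx⟩
        · rcases List.mem_append.mp ha with h1 | h2
          · exact Or.inl h1
          · exact Or.inr ⟨i, List.mem_cons_self, hv, by simpa using h2⟩
        · exact Or.inr ⟨i', List.mem_cons_of_mem _ hm, (pvSet_false.mp hf).1, hx⟩

theorem bfsAltScan_complete (sd : List (Int × Int)) (gids : List Nat) (vis : List Bool)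
    (app : List (Int × Int)) (i : Nat) (hi : i ∈ gids) (hl : i < vis.length) :
    (bfsAltScan sd gids vis app).1[i]? = some true := by
  induction gids generalizing vis app with
  | nil => simp at hi
  | cons i0 rest ih =>
    simp only [bfsAltScan]
    rcases List.mem_cons.mp hi with rfl | hmem
    · cases hb : vis[i]? with
      | none =>
        have := List.getElem?_eq_none_iff.mp hb
        omega
      | some b =>
        cases b with
        | true => exact bfsAltScan_mono sd rest vis app i hb
        | false => exact bfsAltScan_mono sd rest _ _ i (pvSet_true.mpr (Or.inl ⟨rfl, hl⟩))
    · cases hb : vis[i0]? with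
      | none => exact ih vis app hmem hl
      | some b =>
        cases b with
        | true => exact ih vis app hmem hl
        | false => exact ih _ _ hmem (by simpa using hl)

theorem bfsAltScan_flip_push (sd : List (Int × Int)) (gids : List Nat) (vis : List Bool)
    (app : List (Int × Int)) (j : Nat) (h1 : (bfsAltScan sd gids vis app).1[j]? = some true)
    (h0 : vis[j]? = some false) : sd.getD j (0, 0) ∈ (bfsAltScan sd gids vis app).2 := by
  induction gids generalizing vis app with
  | nil =>
    simp only [bfsAltScan] at h1
    rw [h0] at h1
    simp at h1
  | cons i rest ih =>
    simp only [bfsAltScan] at h1 ⊢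
    cases hv : vis[i]? with
    | none =>
      rw [hv] at h1
      exact ih vis app h1 h0
    | some b =>
      cases b with
      | true =>
        rw [hv] at h1
        exact ih vis app h1 h0
      | false =>
        rw [hv] at h1
        by_cases hji : j = i
        · subst hji
          exact bfsAltScan_app_mono sd rest _ _ _ (by simp)
        · exact ih _ _ h1 (pvSet_false.mpr ⟨h0, hji⟩)

theorem bfsAltScan_stable (sd : List (Int × Int)) (gids : List Nat) (vis : List Bool)
    (app : List (Int × Int)) (j : Nat) (h : vis[j]? = some false) :
    (bfsAltScan sd gids vis app).1[j]? = some false ∨ (bfsAltScan sd gids vis app).1[j]? = some true := by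
  induction gids generalizing vis app with
  | nil => simp only [bfsAltScan]; exact Or.inl h
  | cons i rest ih =>
    simp only [bfsAltScan]
    cases hv : vis[i]? with
    | none => exact ih vis app h
    | some b =>
      cases b with
      | true => exact ih vis app h
      | false =>
        by_cases hji : j = i
        · subst hji
          have hl : j < vis.length := (List.getElem?_eq_some_iff.mp h).1
          exact Or.inr (bfsAltScan_mono sd rest _ _ j (pvSet_true.mpr (Or.inl ⟨rfl, hl⟩)))
        · exact ih _ _ (pvSet_false.mpr ⟨h, hji⟩)

-- ---- B-side group lemmas ----

theorem bfsAltGroup_length (sd : List (Int × Int)) (d : PySem.Dict Int (List Nat))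
    (done : PySem.Set Int) (k : Int) (vis : List Bool) :
    (bfsAltGroup sd d done k vis).2.1.length = vis.length := by
  unfold bfsAltGroup
  by_cases h : k ∈ done
  · simp [h]
  · simp only [h, if_false]
    exact bfsAltScan_length sd (d.getD k []) vis []

theorem bfsAltGroup_mono (sd : List (Int × Int)) (d : PySem.Dict Int (List Nat))
    (done : PySem.Set Int) (k : Int) (vis : List Bool) (j : Nat) (h : vis[j]? = some true) :
    (bfsAltGroup sd d done k vis).2.1[j]? = some true := by
  unfold bfsAltGroup
  by_cases hk : k ∈ done
  · simpa [hk] using h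
  · simp only [hk, if_false]
    exact bfsAltScan_mono sd (d.getD k []) vis [] j h

theorem bfsAltGroup_sound (sd : List (Int × Int)) (d : PySem.Dict Int (List Nat))
    (done : PySem.Set Int) (k : Int) (vis : List Bool) (j : Nat)
    (h : (bfsAltGroup sd d done k vis).2.1[j]? = some true) :
    vis[j]? = some true ∨ (vis[j]? = some false ∧ j ∈ d.getD k []) := by
  unfold bfsAltGroup at h
  by_cases hk : k ∈ done
  · simp only [hk, if_true] at h
    exact Or.inl h
  · simp only [hk, if_false] at h
    exact bfsAltScan_sound sd (d.getD k []) vis [] j h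

theorem bfsAltGroup_pushes (sd : List (Int × Int)) (d : PySem.Dict Int (List Nat))
    (done : PySem.Set Int) (k : Int) (vis : List Bool) (x : Int × Int)
    (h : x ∈ (bfsAltGroup sd d done k vis).2.2) :
    ∃ i ∈ d.getD k [], vis[i]? = some false ∧ x = sd.getD i (0, 0) := by
  unfold bfsAltGroup at h
  by_cases hk : k ∈ done
  · simp [hk] at h
  · simp only [hk, if_false] at h
    rcases bfsAltScan_pushes sd (d.getD k []) vis [] x h with ha | hr
    · simp at ha
    · exact hr

theorem bfsAltGroup_complete (sd : List (Int × Int)) (d : PySem.Dict Int (List Nat))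
    (done : PySem.Set Int) (k : Int) (vis : List Bool) (i : Nat)
    (hi : i ∈ d.getD k []) (hl : i < vis.length)
    (hdone : k ∈ done → vis[i]? = some true) :
    (bfsAltGroup sd d done k vis).2.1[i]? = some true := by
  unfold bfsAltGroup
  by_cases hk : k ∈ done
  · simpa [hk] using hdone hk
  · simp only [hk, if_false]
    exact bfsAltScan_complete sd (d.getD k []) vis [] i hi hl

theorem bfsAltGroup_flip_push (sd : List (Int × Int)) (d : PySem.Dict Int (List Nat))
    (done : PySem.Set Int) (k : Int) (vis : List Bool) (j : Nat)
    (h1 : (bfsAltGroup sd d done k vis).2.1[j]? = some true) (h0 : vis[j]? = some false) :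
    sd.getD j (0, 0) ∈ (bfsAltGroup sd d done k vis).2.2 := by
  unfold bfsAltGroup at h1 ⊢
  by_cases hk : k ∈ done
  · simp only [hk, if_true] at h1
    rw [h0] at h1
    simp at h1
  · simp only [hk, if_false] at h1 ⊢
    exact bfsAltScan_flip_push sd (d.getD k []) vis [] j h1 h0

theorem bfsAltGroup_stable (sd : List (Int × Int)) (d : PySem.Dict Int (List Nat))
    (done : PySem.Set Int) (k : Int) (vis : List Bool) (j : Nat) (h : vis[j]? = some false) :
    (bfsAltGroup sd d done k vis).2.1[j]? = some false ∨
      (bfsAltGroup sd d done k vis).2.1[j]? = some true := by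
  unfold bfsAltGroup
  by_cases hk : k ∈ done
  · simp only [hk, if_true]
    exact Or.inl h
  · simp only [hk, if_false]
    exact bfsAltScan_stable sd (d.getD k []) vis [] j h

theorem bfsAltGroup_inv (sd : List (Int × Int)) (d : PySem.Dict Int (List Nat))
    (done : PySem.Set Int) (k : Int) (vis : List Bool)
    (hbnd : ∀ i ∈ d.getD k [], i < vis.length)
    (hID : ∀ k' ∈ done, ∀ i ∈ d.getD k' [], vis[i]? = some true) :
    ∀ k' ∈ (bfsAltGroup sd d done k vis).1, ∀ i ∈ d.getD k' [],
      (bfsAltGroup sd d done k vis).2.1[i]? = some true := by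
  intro k' hk' i hi
  by_cases hk : k ∈ done
  · unfold bfsAltGroup at hk' ⊢
    simp only [hk, if_true] at hk' ⊢
    exact hID k' hk' i hi
  · unfold bfsAltGroup at hk' ⊢
    simp only [hk, if_false] at hk' ⊢
    rcases (PySem.Set.mem_add done k k').mp hk' with hin | heq
    · exact bfsAltScan_mono sd (d.getD k []) vis [] i (hID k' hin i hi)
    · rw [heq] at hi
      exact bfsAltScan_complete sd (d.getD k []) vis [] i hi (hbnd i hi)

-- ---- B-side run lemmas ----

theorem bfsAltRun_length (sd : List (Int × Int)) (bx byd : PySem.Dict Int (List Nat))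
    (q : List (Int × Int)) (donex doney : PySem.Set Int) (vis : List Bool) :
    (bfsAltRun sd bx byd q donex doney vis).length = vis.length := by
  induction q, donex, doney, vis using bfsAltRun.induct sd bx byd with
  | case1 donex doney vis => simp [bfsAltRun]
  | case2 donex doney vis x y rest rx ry ih =>
    rw [bfsAltRun]
    exact ih.trans ((bfsAltGroup_length sd byd doney y _).trans (bfsAltGroup_length sd bx donex x vis))

theorem bfsAltRun_mono (sd : List (Int × Int)) (bx byd : PySem.Dict Int (List Nat))
    (q : List (Int × Int)) (donex doney : PySem.Set Int) (vis : List Bool) (j : Nat)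
    (h : vis[j]? = some true) : (bfsAltRun sd bx byd q donex doney vis)[j]? = some true := by
  revert h
  induction q, donex, doney, vis using bfsAltRun.induct sd bx byd with
  | case1 donex doney vis => intro h; simpa [bfsAltRun] using h
  | case2 donex doney vis x y rest rx ry ih =>
    intro h
    rw [bfsAltRun]
    exact ih (bfsAltGroup_mono sd byd doney y _ j (bfsAltGroup_mono sd bx donex x vis j h))

theorem bfsAltRun_L (sd : List (Int × Int)) (bx byd : PySem.Dict Int (List Nat))
    (q : List (Int × Int)) (donex doney : PySem.Set Int) (vis : List Bool)
    (hbnd : ∀ (k : Int) (i : Nat), i ∈ bx.getD k [] ∨ i ∈ byd.getD k [] → i < vis.length)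
    (hIDx : ∀ k ∈ donex, ∀ i ∈ bx.getD k [], vis[i]? = some true)
    (hIDy : ∀ k ∈ doney, ∀ i ∈ byd.getD k [], vis[i]? = some true)
    (v : Int × Int) (hv : v ∈ q) (i : Nat)
    (hi : i ∈ bx.getD v.1 [] ∨ i ∈ byd.getD v.2 []) :
    (bfsAltRun sd bx byd q donex doney vis)[i]? = some true := by
  revert hbnd hIDx hIDy hv
  induction q, donex, doney, vis using bfsAltRun.induct sd bx byd with
  | case1 donex doney vis => intro _ _ _ hv; simp at hv
  | case2 donex doney vis x y rest rx ry ih =>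
    intro hbnd hIDx hIDy hv
    rw [bfsAltRun]
    have hIDx1 := bfsAltGroup_inv sd bx donex x vis (fun i hi => hbnd x i (Or.inl hi)) hIDx
    have hIDy1 : ∀ k ∈ doney, ∀ i ∈ byd.getD k [],
        (bfsAltGroup sd bx donex x vis).2.1[i]? = some true :=
      fun k hk i hi => bfsAltGroup_mono sd bx donex x vis i (hIDy k hk i hi)
    have hlen1 := bfsAltGroup_length sd bx donex x vis
    have hIDy2 := bfsAltGroup_inv sd byd doney y (bfsAltGroup sd bx donex x vis).2.1
      (fun i hi => by rw [hlen1]; exact hbnd y i (Or.inr hi)) hIDy1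
    have hIDx2 : ∀ k ∈ (bfsAltGroup sd bx donex x vis).1, ∀ i ∈ bx.getD k [],
        (bfsAltGroup sd byd doney y (bfsAltGroup sd bx donex x vis).2.1).2.1[i]? = some true :=
      fun k hk i hi => bfsAltGroup_mono sd byd doney y _ i (hIDx1 k hk i hi)
    have hlen2 := bfsAltGroup_length sd byd doney y (bfsAltGroup sd bx donex x vis).2.1
    have hbnd2 : ∀ (k : Int) (i : Nat), i ∈ bx.getD k [] ∨ i ∈ byd.getD k [] →
        i < (bfsAltGroup sd byd doney y (bfsAltGroup sd bx donex x vis).2.1).2.1.length := by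
      intro k i hik
      rw [hlen2, hlen1]
      exact hbnd k i hik
    rcases List.mem_cons.mp hv with rfl | hmem
    · rcases hi with hix | hiy
      · have h1 : (bfsAltGroup sd bx donex x vis).2.1[i]? = some true :=
          bfsAltGroup_complete sd bx donex x vis i hix (hbnd x i (Or.inl hix))
            (fun hd => hIDx x hd i hix)
        exact bfsAltRun_mono sd bx byd _ _ _ _ i (bfsAltGroup_mono sd byd doney y _ i h1)
      · have h1 : (bfsAltGroup sd byd doney y (bfsAltGroup sd bx donex x vis).2.1).2.1[i]? = some true :=
          bfsAltGroup_complete sd byd doney y _ i hiy (by rw [hlen1]; exact hbnd y i (Or.inr hiy))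
            (fun hd => bfsAltGroup_mono sd bx donex x vis i (hIDy y hd i hiy))
        exact bfsAltRun_mono sd bx byd _ _ _ _ i h1
    · exact ih hbnd2 hIDx2 hIDy2 (List.mem_append_left _ (List.mem_append_left _ hmem))

theorem bfsAltRun_C (sd : List (Int × Int)) (bx byd : PySem.Dict Int (List Nat))
    (q : List (Int × Int)) (donex doney : PySem.Set Int) (vis : List Bool)
    (hbnd : ∀ (k : Int) (i : Nat), i ∈ bx.getD k [] ∨ i ∈ byd.getD k [] → i < vis.length)
    (hIDx : ∀ k ∈ donex, ∀ i ∈ bx.getD k [], vis[i]? = some true)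
    (hIDy : ∀ k ∈ doney, ∀ i ∈ byd.getD k [], vis[i]? = some true)
    (j i : Nat) (h1 : (bfsAltRun sd bx byd q donex doney vis)[j]? = some true)
    (h0 : vis[j]? = some false)
    (hi : i ∈ bx.getD (sd.getD j (0, 0)).1 [] ∨ i ∈ byd.getD (sd.getD j (0, 0)).2 []) :
    (bfsAltRun sd bx byd q donex doney vis)[i]? = some true := by
  revert hbnd hIDx hIDy h1 h0
  induction q, donex, doney, vis using bfsAltRun.induct sd bx byd with
  | case1 donex doney vis =>
    intro _ _ _ h1 h0
    rw [bfsAltRun] at h1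
    rw [h0] at h1
    simp at h1
  | case2 donex doney vis x y rest rx ry ih =>
    intro hbnd hIDx hIDy h1 h0
    rw [bfsAltRun] at h1 ⊢
    have hIDx1 := bfsAltGroup_inv sd bx donex x vis (fun i hi => hbnd x i (Or.inl hi)) hIDx
    have hIDy1 : ∀ k ∈ doney, ∀ i ∈ byd.getD k [],
        (bfsAltGroup sd bx donex x vis).2.1[i]? = some true :=
      fun k hk i hi => bfsAltGroup_mono sd bx donex x vis i (hIDy k hk i hi)
    have hlen1 := bfsAltGroup_length sd bx donex x vis
    have hIDy2 := bfsAltGroup_inv sd byd doney y (bfsAltGroup sd bx donex x vis).2.1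
      (fun i hi => by rw [hlen1]; exact hbnd y i (Or.inr hi)) hIDy1
    have hIDx2 : ∀ k ∈ (bfsAltGroup sd bx donex x vis).1, ∀ i ∈ bx.getD k [],
        (bfsAltGroup sd byd doney y (bfsAltGroup sd bx donex x vis).2.1).2.1[i]? = some true :=
      fun k hk i hi => bfsAltGroup_mono sd byd doney y _ i (hIDx1 k hk i hi)
    have hlen2 := bfsAltGroup_length sd byd doney y (bfsAltGroup sd bx donex x vis).2.1
    have hbnd2 : ∀ (k : Int) (i : Nat), i ∈ bx.getD k [] ∨ i ∈ byd.getD k [] →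
        i < (bfsAltGroup sd byd doney y (bfsAltGroup sd bx donex x vis).2.1).2.1.length := by
      intro k i hik
      rw [hlen2, hlen1]
      exact hbnd k i hik
    rcases bfsAltGroup_stable sd bx donex x vis j h0 with hf1 | ht1
    · rcases bfsAltGroup_stable sd byd doney y _ j hf1 with hf2 | ht2
      · exact ih hbnd2 hIDx2 hIDy2 h1 hf2
      · have hpush := bfsAltGroup_flip_push sd byd doney y _ j ht2 hf1
        exact bfsAltRun_L sd bx byd _ _ _ _ hbnd2 hIDx2 hIDy2 (sd.getD j (0, 0))
          (List.mem_append_right _ hpush) i hi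
    · have hpush := bfsAltGroup_flip_push sd bx donex x vis j ht1 h0
      exact bfsAltRun_L sd bx byd _ _ _ _ hbnd2 hIDx2 hIDy2 (sd.getD j (0, 0))
        (List.mem_append_left _ (List.mem_append_right _ hpush)) i hi

theorem bfsAltRun_sound (sd : List (Int × Int)) (start : Int × Int) (v0 : List Bool)
    (bx byd : PySem.Dict Int (List Nat))
    (hGx : ∀ (k : Int) (i : Nat), i ∈ bx.getD k [] → v0[i]? = some false ∧ ∃ c, sd[i]? = some c ∧ c.1 = k)
    (hGy : ∀ (k : Int) (i : Nat), i ∈ byd.getD k [] → v0[i]? = some false ∧ ∃ c, sd[i]? = some c ∧ c.2 = k)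
    (q : List (Int × Int)) (donex doney : PySem.Set Int) (vis : List Bool)
    (hq : ∀ w ∈ q, w = start ∨ ∃ j c, pvReach sd start v0 j ∧ sd[j]? = some c ∧ c = w)
    (hv : ∀ j : Nat, vis[j]? = some true → v0[j]? = some true ∨ pvReach sd start v0 j)
    (j : Nat) (h : (bfsAltRun sd bx byd q donex doney vis)[j]? = some true) :
    v0[j]? = some true ∨ pvReach sd start v0 j := by
  revert hq hv h
  induction q, donex, doney, vis using bfsAltRun.induct sd bx byd with
  | case1 donex doney vis =>
    intro _ hv h
    rw [bfsAltRun] at h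
    exact hv j h
  | case2 donex doney vis x y rest rx ry ih =>
    intro hq hv h
    rw [bfsAltRun] at h
    have hstep : ∀ (i : Nat) (c : Int × Int), sd[i]? = some c → v0[i]? = some false →
        (c.1 = x ∨ c.2 = y) → pvReach sd start v0 i := by
      intro i c hic hi0 hsh
      rcases hq (x, y) List.mem_cons_self with heq | ⟨j3, c3, hr3, hj3, heq⟩
      · refine pvReach.base i c hic hi0 ?_
        rcases hsh with h' | h'
        · exact Or.inl (by rw [← heq, h'])
        · exact Or.inr (by rw [← heq, h'])
      · refine pvReach.step j3 i c3 c hr3 hj3 hic hi0 ?_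
        rcases hsh with h' | h'
        · exact Or.inl (by rw [heq, h'])
        · exact Or.inr (by rw [heq, h'])
    have hreachx : ∀ i ∈ bx.getD x [], pvReach sd start v0 i := by
      intro i hi
      rcases hGx x i hi with ⟨hi0, c, hic, hc1⟩
      exact hstep i c hic hi0 (Or.inl hc1)
    have hreachy : ∀ i ∈ byd.getD y [], pvReach sd start v0 i := by
      intro i hi
      rcases hGy y i hi with ⟨hi0, c, hic, hc2⟩
      exact hstep i c hic hi0 (Or.inr hc2)
    refine ih ?_ ?_ h
    · intro w hw
      rcases List.mem_append.mp hw with hw1 | hw2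
      · rcases List.mem_append.mp hw1 with hw3 | hw4
        · exact hq w (List.mem_cons_of_mem _ hw3)
        · rcases bfsAltGroup_pushes sd bx donex x vis w hw4 with ⟨i, hig, _, hwv⟩
          rcases hGx x i hig with ⟨hi0, c, hic, hc1⟩
          have hcw : c = w := by
            rw [hwv, List.getD_eq_getElem?_getD, hic]
            rfl
          exact Or.inr ⟨i, c, hreachx i hig, hic, hcw⟩
      · rcases bfsAltGroup_pushes sd byd doney y _ w hw2 with ⟨i, hig, _, hwv⟩
        rcases hGy y i hig with ⟨hi0, c, hic, hc2⟩
        have hcw : c = w := by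
          rw [hwv, List.getD_eq_getElem?_getD, hic]
          rfl
        exact Or.inr ⟨i, c, hreachy i hig, hic, hcw⟩
    · intro j2 hj2
      rcases bfsAltGroup_sound sd byd doney y _ j2 hj2 with ht2 | ⟨_, hg2⟩
      · rcases bfsAltGroup_sound sd bx donex x vis j2 ht2 with ht1 | ⟨_, hg1⟩
        · exact hv j2 ht1
        · exact Or.inr (hreachx j2 hg1)
      · exact Or.inr (hreachy j2 hg2)

-- ---- the grouping dictionaries of B ----

theorem pvDict_mem (sd : List (Int × Int)) (v0 : List Bool) (key : Nat → Int) (k : Int) (i : Nat) :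
    i ∈ (((List.range sd.length).filter (fun i => !(v0.getD i false))).foldl
        (fun d i => d.modify (key i) [] (· ++ [i])) PySem.Dict.empty).getD k [] ↔
      i < sd.length ∧ v0.getD i false = false ∧ key i = k := by
  rw [show (fun (d : PySem.Dict Int (List Nat)) (i : Nat) => d.modify (key i) [] (· ++ [i])) =
      (fun d i => (fun (d : PySem.Dict Int (List Nat)) (p : Int × Nat) =>
        d.modify p.1 [] (· ++ [p.2])) d ((fun i => (key i, i)) i)) from rfl,
    ← List.foldl_map (f := fun i : Nat => (key i, i))
      (g := fun (d : PySem.Dict Int (List Nat)) (p : Int × Nat) => d.modify p.1 [] (· ++ [p.2])),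
    PySem.Dict.getD_foldl_modify_append]
  simp [List.mem_filter, List.mem_map, List.mem_range]
  tauto

theorem bfs_alt_eq (sd : List (Int × Int)) (start : Int × Int) (v0 : List Bool) :
    bfs_alt sd start v0 =
      bfsAltRun sd
        (((List.range sd.length).filter (fun i => !(v0.getD i false))).foldl
          (fun d i => d.modify ((sd.getD i (0, 0)).1) [] (· ++ [i])) PySem.Dict.empty)
        (((List.range sd.length).filter (fun i => !(v0.getD i false))).foldl
          (fun d i => d.modify ((sd.getD i (0, 0)).2) [] (· ++ [i])) PySem.Dict.empty)
        [start] [] [] v0 := by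
  simp only [bfs_alt]
  rw [PySem.List.foldl_prod_mk
    (fun (d : PySem.Dict Int (List Nat)) (i : Nat) => d.modify (sd.getD i (0, 0)).1 [] (· ++ [i]))
    (fun (d : PySem.Dict Int (List Nat)) (i : Nat) => d.modify (sd.getD i (0, 0)).2 [] (· ++ [i]))]

theorem bfs_alt_char (sd : List (Int × Int)) (start : Int × Int) (v0 : List Bool)
    (hnm : sd.length ≤ v0.length) (j : Nat) :
    (bfs_alt sd start v0)[j]? = some true ↔ (v0[j]? = some true ∨ pvReach sd start v0 j) := by
  rw [bfs_alt_eq]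
  set BX := (((List.range sd.length).filter (fun i => !(v0.getD i false))).foldl
    (fun d i => d.modify ((sd.getD i (0, 0)).1) [] (· ++ [i])) PySem.Dict.empty) with hBX
  set BY := (((List.range sd.length).filter (fun i => !(v0.getD i false))).foldl
    (fun d i => d.modify ((sd.getD i (0, 0)).2) [] (· ++ [i])) PySem.Dict.empty) with hBY
  have hconv : ∀ i : Nat, i < v0.length → (v0.getD i false = false ↔ v0[i]? = some false) := by
    intro i hi
    rw [List.getD_eq_getElem?_getD, List.getElem?_eq_getElem hi]
    cases hbi : v0[i] <;> simp
  have hGx : ∀ (k : Int) (i : Nat), i ∈ BX.getD k [] →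
      v0[i]? = some false ∧ ∃ c, sd[i]? = some c ∧ c.1 = k := by
    intro k i hi
    rcases (pvDict_mem sd v0 _ k i).mp hi with ⟨h1, h2, h3⟩
    have hlt : i < v0.length := lt_of_lt_of_le h1 hnm
    refine ⟨(hconv i hlt).mp h2, sd[i], List.getElem?_eq_getElem h1, ?_⟩
    rw [← h3, List.getD_eq_getElem?_getD, List.getElem?_eq_getElem h1]
    rfl
  have hGy : ∀ (k : Int) (i : Nat), i ∈ BY.getD k [] →
      v0[i]? = some false ∧ ∃ c, sd[i]? = some c ∧ c.2 = k := by
    intro k i hi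
    rcases (pvDict_mem sd v0 _ k i).mp hi with ⟨h1, h2, h3⟩
    have hlt : i < v0.length := lt_of_lt_of_le h1 hnm
    refine ⟨(hconv i hlt).mp h2, sd[i], List.getElem?_eq_getElem h1, ?_⟩
    rw [← h3, List.getD_eq_getElem?_getD, List.getElem?_eq_getElem h1]
    rfl
  have hmem : ∀ (i : Nat) (c : Int × Int), sd[i]? = some c → v0[i]? = some false →
      i ∈ BX.getD c.1 [] ∧ i ∈ BY.getD c.2 [] := by
    intro i c hic hi0
    have h1 : i < sd.length := (List.getElem?_eq_some_iff.mp hic).1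
    have hlt : i < v0.length := lt_of_lt_of_le h1 hnm
    have hg : sd.getD i (0, 0) = c := by rw [List.getD_eq_getElem?_getD, hic]; rfl
    constructor
    · exact (pvDict_mem sd v0 _ c.1 i).mpr ⟨h1, (hconv i hlt).mpr hi0, by rw [hg]⟩
    · exact (pvDict_mem sd v0 _ c.2 i).mpr ⟨h1, (hconv i hlt).mpr hi0, by rw [hg]⟩
  have hbnd : ∀ (k : Int) (i : Nat), i ∈ BX.getD k [] ∨ i ∈ BY.getD k [] → i < v0.length := by
    intro k i hik
    rcases hik with hik | hik
    · exact lt_of_lt_of_le ((pvDict_mem sd v0 _ k i).mp hik).1 hnm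
    · exact lt_of_lt_of_le ((pvDict_mem sd v0 _ k i).mp hik).1 hnm
  constructor
  · intro h
    exact bfsAltRun_sound sd start v0 BX BY hGx hGy [start] [] [] v0
      (by intro w hw; simp at hw; exact Or.inl hw) (fun _ h => Or.inl h) j h
  · intro h
    rcases h with h0 | hr
    · exact bfsAltRun_mono sd BX BY [start] [] [] v0 j h0
    · induction hr with
      | base i c hi hv0 hsh =>
        apply bfsAltRun_L sd BX BY [start] [] [] v0 hbnd (by simp)
          (by simp) start (by simp) i
        rcases hsh with hx | hy
        · exact Or.inl (by rw [hx]; exact (hmem i c hi hv0).1)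
        · exact Or.inr (by rw [hy]; exact (hmem i c hi hv0).2)
      | step j' i cj ci hr' hj' hi hv0i hsh ihr =>
        apply bfsAltRun_C sd BX BY [start] [] [] v0 hbnd (by simp)
          (by simp) j' i ihr (pvReach_inv hr').1
        have hgj : sd.getD j' (0, 0) = cj := by rw [List.getD_eq_getElem?_getD, hj']; rfl
        rw [hgj]
        rcases hsh with hx | hy
        · exact Or.inl (by rw [hx]; exact (hmem i ci hi hv0i).1)
        · exact Or.inr (by rw [hy]; exact (hmem i ci hi hv0i).2)

theorem bfs_length (sd : List (Int × Int)) (start : Int × Int) (v0 : List Bool) :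
    (bfs sd start v0).length = v0.length := by
  unfold bfs
  exact bfsRun_length sd [start] v0

theorem bfs_alt_length (sd : List (Int × Int)) (start : Int × Int) (v0 : List Bool) :
    (bfs_alt sd start v0).length = v0.length := by
  rw [bfs_alt_eq]
  exact bfsAltRun_length sd _ _ [start] [] [] v0

-- ===== VERDICT (by name: the statement gids the Claim_ definition above) =====
theorem bfs_spec : Claim_equal_bfs := by
  intro sd start v0 _ hpre
  unfold Spec_bfs
  apply List.ext_getElem?
  intro j
  by_cases hj : j < v0.length
  · have ha : (bfs sd start v0)[j]? = some ((bfs sd start v0)[j]'(by rw [bfs_length]; exact hj)) :=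
      List.getElem?_eq_getElem _
    have hb : (bfs_alt sd start v0)[j]? = some ((bfs_alt sd start v0)[j]'(by rw [bfs_alt_length]; exact hj)) :=
      List.getElem?_eq_getElem _
    rw [ha, hb]
    have hiff := (bfs_char sd start v0 hpre j).trans (bfs_alt_char sd start v0 hpre j).symm
    rw [ha, hb] at hiff
    simp only [Option.some.injEq] at hiff ⊢
    exact Bool.coe_iff_coe.mp (by constructor <;> intro h <;> [exact hiff.mp h; exact hiff.mpr h])
  · rw [List.getElem?_eq_none (by rw [bfs_length]; omega),
      List.getElem?_eq_none (by rw [bfs_alt_length]; omega)]
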